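-- pv_equiv track=rewrite | github.com/InfantRaj-hexaware/Visual-Workbench | Backend/Master Backend Files/Coding Files/entity_extractor.py | check_sign
-- ===== SOURCE A (Python) =====
-- def check_sign(text):
--     '''
--     check the sign of text
--     last means negative vice verse
--     '''
--     negative_terms = ['past','last']
--     positive_terms = ['present','next']
--     if any([i for i in text.split(' ') if i in negative_terms]):
--         sign = '-'
--     elif any([i for i in text.split(' ') if i in positive_terms]):
--         sign = '+'
--     else:
--         sign = ''
--     return sign
-- ===== SOURCE B (Python) =====
-- def check_sign(text):
--     '''
--     check the sign of text
--     last means negative vice verse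
--     '''
--     words = set(text.split(' '))
--     for term, sign in (('past', '-'), ('last', '-'), ('present', '+'), ('next', '+')):
--         if term in words:
--             return sign
--     return ''
-- ===== Notes on version B (the rewrite author's own statement) =====
-- stated objective: alternative
-- what changed: Inverts the traversal: instead of scanning the word list against the term lists twice, B builds a set of the words once and probes the four keywords in negative-first priority order, returning the sign of the first keyword present.
import Mathlib
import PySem

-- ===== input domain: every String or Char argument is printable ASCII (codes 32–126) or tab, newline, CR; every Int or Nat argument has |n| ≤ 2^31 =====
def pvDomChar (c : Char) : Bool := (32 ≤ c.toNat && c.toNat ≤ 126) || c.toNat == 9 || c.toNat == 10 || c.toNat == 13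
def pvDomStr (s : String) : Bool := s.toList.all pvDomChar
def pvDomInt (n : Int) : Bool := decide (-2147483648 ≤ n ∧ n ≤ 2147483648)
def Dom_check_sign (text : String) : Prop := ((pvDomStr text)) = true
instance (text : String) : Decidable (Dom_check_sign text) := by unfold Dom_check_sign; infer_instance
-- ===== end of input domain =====

-- B inverts the traversal: it builds a set of the words once and probes the four keywords
-- in negative-first priority order, returning the sign of the first keyword present (alternative).
-- ===== PORT A =====
def check_sign (text : String) : String :=
  let negative_terms : List String := ["past", "last"]
  let positive_terms : List String := ["present", "next"]
  -- Python truthiness of a string: nonempty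
  if (((PySem.Chars.splitOn text.toList " ".toList).map String.ofList).filter (fun i => i ∈ negative_terms)).any (fun i => i ≠ "") then
    "-"
  else if (((PySem.Chars.splitOn text.toList " ".toList).map String.ofList).filter (fun i => i ∈ positive_terms)).any (fun i => i ≠ "") then
    "+"
  else
    ""

-- ===== PORT B =====
-- the keyword → sign table, in B's probe order
def pvTable : List (String × String) := [("past", "-"), ("last", "-"), ("present", "+"), ("next", "+")]

-- the for-loop over the table: return the sign of the first keyword found in the word set
def pvProbe (table : List (String × String)) (words : PySem.Set String) : String :=
  match table with
  | [] => ""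
  | (term, sign) :: rest => if PySem.Set.contains words term then sign else pvProbe rest words

def check_sign_alt (text : String) : String :=
  let words : PySem.Set String :=
    PySem.Set.ofList ((PySem.Chars.splitOn text.toList " ".toList).map String.ofList)
  pvProbe pvTable words

-- ===== PRECONDITION & SPEC =====
def Spec_check_sign (text : String) (out : String) : Prop := out = check_sign_alt text
instance (text : String) (out : String) : Decidable (Spec_check_sign text out) := by unfold Spec_check_sign; infer_instance

-- ===== CLAIM (what is proved, stated in full; the proofs are below) =====
def Claim_equal_check_sign : Prop := ∀ (text : String), Dom_check_sign text → Spec_check_sign text (check_sign text)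

-- ===== LEMMAS AND PROOFS =====
-- A's filter-and-any over a term list of nonempty words equals a disjunction of memberships
theorem pvFilterAny (ws : List String) (t1 t2 : String) (h1 : t1 ≠ "") (h2 : t2 ≠ "") :
    ((ws.filter (fun i => i ∈ ([t1, t2] : List String))).any (fun i => i ≠ "")) =
      (ws.contains t1 || ws.contains t2) := by
  induction ws with
  | nil => simp
  | cons w ws ih =>
    by_cases hw1 : w = t1
    · subst hw1; simp [h1]
    · by_cases hw2 : w = t2
      · subst hw2; simp [h2]
      · have hm : (w ∈ ([t1, t2] : List String)) = False := by simp [hw1, hw2]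
        have hr : ((List.filter (fun i => decide (i ∈ [t1, t2])) ws).any fun i => decide (i ≠ "")) = (decide (t1 ∈ ws) || decide (t2 ∈ ws)) := by
          simpa [List.contains_iff_mem] using ih
        simp [List.filter_cons, hm, hw1, hw2, Ne.symm hw1, Ne.symm hw2]
        simpa [List.filter_cons, decide_eq_true_eq] using hr

-- membership in the set of the words is membership in the word list
theorem pvContainsOfList (ws : List String) (t : String) :
    PySem.Set.contains (PySem.Set.ofList ws) t = ws.contains t := by
  simp [PySem.Set.contains, PySem.Set.mem_ofList]

-- the two programs agree for any word list
theorem pvMain (ws : List String) :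
    (if ((ws.filter (fun i => i ∈ (["past", "last"] : List String))).any (fun i => i ≠ "")) then "-"
     else if ((ws.filter (fun i => i ∈ (["present", "next"] : List String))).any (fun i => i ≠ "")) then "+"
     else ("" : String)) = pvProbe pvTable (PySem.Set.ofList ws) := by
  simp only [pvProbe, pvTable, pvContainsOfList,
    pvFilterAny ws "past" "last" (by decide) (by decide),
    pvFilterAny ws "present" "next" (by decide) (by decide)]
  cases h1 : ws.contains "past" <;> cases h2 : ws.contains "last" <;>
    cases h3 : ws.contains "present" <;> cases h4 : ws.contains "next" <;> simp

-- ===== VERDICT (by name: the statement is the Claim_ definition above) =====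
theorem check_sign_spec : Claim_equal_check_sign := by
  intro text _
  unfold Spec_check_sign check_sign check_sign_alt
  exact pvMain ((PySem.Chars.splitOn text.toList " ".toList).map String.ofList)
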